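-- pv_equiv track=rewrite | github.com/HBinhCT/Q-project | hackerearth/Algorithms/Make the strings equal/solution.py | check
-- ===== SOURCE A (Python) =====
-- from collections import Counter
--
-- def check(string1, string2):
--     if Counter(string1) != Counter(string2):
--         return False
--     if any(v > 1 for v in Counter(string1).values()):
--         return True
--     count = 0
--     while len(string1) > 2:
--         pos = string2.index(string1[0])
--         count += pos
--         string1 = string1[1:]
--         string2 = string2[:pos] + string2[pos + 1:]
--     return (count % 2 == 1) != (string1 == string2)
-- ===== SOURCE B (Python) =====
-- def check(string1, string2):
--     # anagram test: same sorted character sequence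
--     if sorted(string1) != sorted(string2):
--         return False
--     # any repeated character makes the strings always transformable
--     if len(set(string1)) != len(string1):
--         return True
--     # all characters distinct: answer = "the permutation taking string2 to
--     # string1 is even", computed by counting inverted pairs of positions
--     pos = {ch: i for i, ch in enumerate(string2)}
--     rest = [pos[ch] for ch in string1]
--     inv = 0
--     while rest:
--         head = rest[0]
--         rest = rest[1:]
--         inv += sum(1 for q in rest if q < head)
--     return inv % 2 == 0
-- ===== Notes on version B (the rewrite author's own statement) =====
-- stated objective: alternative
-- what changed: A's quadratic elimination loop (repeated string2.index plus slicing rebuilds of both strings) is replaced by building a character-position map once and counting inverted position pairs to get the permutation parity, with the anagram test done via sorted() and the duplicate test via set(); same value on every input.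
import Mathlib
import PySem

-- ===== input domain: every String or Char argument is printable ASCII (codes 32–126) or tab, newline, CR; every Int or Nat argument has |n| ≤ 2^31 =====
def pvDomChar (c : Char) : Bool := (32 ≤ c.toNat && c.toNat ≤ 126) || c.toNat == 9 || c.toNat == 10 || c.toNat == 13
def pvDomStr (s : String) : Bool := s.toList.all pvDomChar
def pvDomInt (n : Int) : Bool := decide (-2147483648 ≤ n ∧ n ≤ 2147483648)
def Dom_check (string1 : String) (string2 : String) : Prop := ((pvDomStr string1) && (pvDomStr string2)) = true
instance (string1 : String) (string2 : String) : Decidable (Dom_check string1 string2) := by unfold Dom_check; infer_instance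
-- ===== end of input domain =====

-- B replaces A's quadratic index-and-slice elimination loop by a one-pass position
-- map plus direct inversion-pair counting (with sorted/set based anagram and
-- duplicate checks); same return value on every input (neither side raises).

-- ===== PORT A =====
-- Python's 'Counter(x) != Counter(y)' compares dicts ignoring insertion order: same
-- key set and the same value at every key (exact: counters never store zero counts).
def pvDictEq (d1 d2 : PySem.Dict Char Int) : Bool :=
  PySem.Set.equal d1.keys d2.keys && d1.keys.all (fun k => d1.getD k 0 == d2.getD k 0)

-- the 'while len(string1) > 2' loop; string2.index(string1[0]) is ported as
-- PySem.Chars.find, exact here because the loop is only reached when the two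
-- strings have equal Counters, so string1[0] always occurs in string2.
def elimLoop : List Char → List Char → Int → Int × List Char × List Char
  | a :: b :: c :: t, l2, count =>
    let pos := PySem.Chars.find l2 [a]
    elimLoop (b :: c :: t)
      (PySem.List.slice l2 none (some pos) ++ PySem.List.slice l2 (some (pos + 1)) none)
      (count + pos)
  | l1, l2, count => (count, l1, l2)

def check (string1 : String) (string2 : String) : Bool :=
  let l1 := string1.toList
  let l2 := string2.toList
  if !pvDictEq (PySem.Dict.counter l1) (PySem.Dict.counter l2) then false
  else if (PySem.Dict.counter l1).values.any (fun v => 1 < v) then true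
  else
    let r := elimLoop l1 l2 0
    (decide (PySem.Int.mod r.1 2 = 1)) != (r.2.1 == r.2.2)

-- ===== PORT B =====
-- 'while rest: head, rest = rest[0], rest[1:]; inv += sum(1 for q in rest if q < head)'
def invCount : List Int → Int
  | [] => 0
  | head :: rest => (rest.countP (fun q => decide (q < head)) : Int) + invCount rest

def check_alt (string1 : String) (string2 : String) : Bool :=
  let l1 := string1.toList
  let l2 := string2.toList
  if PySem.List.sorted l1 (fun x => x) != PySem.List.sorted l2 (fun x => x) then false
  else if (PySem.Set.ofList l1).length != l1.length then true
  else
    let pos := (PySem.List.enumerate l2).foldl (fun d p => d.insert p.2 p.1) PySem.Dict.empty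
    let rest := l1.map (fun c => pos.getD c 0)
    decide (PySem.Int.mod (invCount rest) 2 = 0)

-- ===== PRECONDITION & SPEC =====
def Spec_check (string1 : String) (string2 : String) (out : Bool) : Prop := out = check_alt string1 string2
instance (string1 : String) (string2 : String) (out : Bool) : Decidable (Spec_check string1 string2 out) := by unfold Spec_check; infer_instance

-- ===== CLAIM (what is proved, stated in full; the proofs are below) =====
def Claim_equal_check : Prop := ∀ (string1 : String) (string2 : String), Dom_check string1 string2 → Spec_check string1 string2 (check string1 string2)

-- ===== LEMMAS AND PROOFS =====

theorem pv_singleton_prefix_iff (a : Char) (u : List Char) : [a] <+: u ↔ u.head? = some a := by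
  cases u with
  | nil => simp
  | cons x t => simp [List.cons_prefix_cons, eq_comm]

theorem pv_idxOf_le_of_getElem (l : List Char) (a : Char) :
    ∀ (k : Nat), (hk : k < l.length) → l[k] = a → l.idxOf a ≤ k := by
  induction l with
  | nil => simp
  | cons x t ih =>
    intro k hk h
    by_cases hx : x = a
    · subst hx; simp [List.idxOf_cons_self]
    · cases k with
      | zero => simp at h; exact absurd h hx
      | succ k =>
        rw [List.idxOf_cons_ne _ hx]
        simpa using Nat.succ_le_succ (ih k (by simpa using hk) (by simpa using h))

-- A's string2.index(string1[0]): find of a 1-char pattern = idxOf when present.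
theorem pv_find_singleton (l2 : List Char) (a : Char) (ha : a ∈ l2) :
    PySem.Chars.find l2 [a] = (l2.idxOf a : Int) := by
  have hinf : [a] <:+: l2 := (List.singleton_infix_iff a l2).mpr ha
  have h0 : 0 ≤ PySem.Chars.find l2 [a] := by
    have h1 : PySem.Chars.find l2 [a] ≠ -1 := (PySem.Chars.find_ne_neg_one_iff l2 [a]).mpr hinf
    have h2' : -1 ≤ PySem.Chars.find l2 [a] := PySem.Chars.neg_one_le_find l2 [a]
    omega
  obtain ⟨hpre, hmin⟩ := PySem.Chars.find_spec h0
  have hW : l2[(PySem.Chars.find l2 [a]).toNat]? = some a := by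
    rw [← List.head?_drop, ← pv_singleton_prefix_iff]; exact hpre
  have hklen : (PySem.Chars.find l2 [a]).toNat < l2.length := by
    have := List.getElem?_eq_some_iff.mp hW; exact this.1
  have hka : l2[(PySem.Chars.find l2 [a]).toNat] = a := by
    have := List.getElem?_eq_some_iff.mp hW; exact this.2
  have h1 : l2.idxOf a ≤ (PySem.Chars.find l2 [a]).toNat :=
    pv_idxOf_le_of_getElem l2 a _ hklen hka
  have hplen : l2.idxOf a < l2.length := List.idxOf_lt_length_of_mem ha
  have h2 : ¬ (l2.idxOf a < (PySem.Chars.find l2 [a]).toNat) := by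
    intro hlt
    apply hmin _ hlt
    rw [pv_singleton_prefix_iff, List.head?_drop]
    exact List.getElem?_eq_some_iff.mpr ⟨hplen, List.getElem_idxOf hplen⟩
  have : l2.idxOf a = (PySem.Chars.find l2 [a]).toNat := by omega
  omega

-- A's first guard: equal Counters ↔ the character lists are permutations.
theorem pvDictEq_counter_iff (l1 l2 : List Char) :
    pvDictEq (PySem.Dict.counter l1) (PySem.Dict.counter l2) = true ↔ l1.Perm l2 := by
  unfold pvDictEq
  rw [Bool.and_eq_true, PySem.Set.equal_iff, List.all_eq_true]
  constructor
  · rintro ⟨hkeys, hvals⟩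
    rw [List.perm_iff_count]
    intro c
    by_cases hc : c ∈ l1
    · have hmem : c ∈ (PySem.Dict.counter l1).keys := by
        rw [PySem.Dict.keys_counter]; exact (PySem.Set.mem_ofList _ _).mpr hc
      have := hvals c hmem
      rw [beq_iff_eq, PySem.Dict.getD_counter, PySem.Dict.getD_counter] at this
      exact_mod_cast this
    · have hc2 : c ∉ l2 := by
        intro hc2
        apply hc
        have : c ∈ (PySem.Dict.counter l2).keys := by
          rw [PySem.Dict.keys_counter]; exact (PySem.Set.mem_ofList _ _).mpr hc2
        have := (hkeys c).mpr (by rwa [PySem.Dict.keys_counter] at this ⊢)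
        rw [PySem.Dict.keys_counter, PySem.Set.mem_ofList] at this
        exact this
      rw [List.count_eq_zero_of_not_mem hc, List.count_eq_zero_of_not_mem hc2]
  · intro h
    constructor
    · intro x
      rw [PySem.Dict.keys_counter, PySem.Dict.keys_counter, PySem.Set.mem_ofList,
        PySem.Set.mem_ofList]
      exact h.mem_iff
    · intro k _
      rw [beq_iff_eq, PySem.Dict.getD_counter, PySem.Dict.getD_counter]
      exact_mod_cast (List.perm_iff_count.mp h k)

-- A's second guard: some count exceeds 1 ↔ l1 has a duplicate.
theorem counter_any_gt_one_iff (l1 : List Char) :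
    ((PySem.Dict.counter l1).values.any (fun v => 1 < v)) = true ↔ ¬ l1.Nodup := by
  rw [PySem.Dict.values_eq_map_keys _ (PySem.Dict.nodup_keys_counter l1) 0,
    List.any_map, List.any_eq_true]
  constructor
  · rintro ⟨c, hc, hgt⟩
    simp only [Function.comp, PySem.Dict.getD_counter, decide_eq_true_eq] at hgt
    intro hn
    have := (List.nodup_iff_count_le_one.mp hn) c
    have h2 : (1 : Int) < (l1.count c : Int) := hgt
    omega
  · intro h
    have hnall : ¬ ∀ a, l1.count a ≤ 1 :=
      fun hall => h (List.nodup_iff_count_le_one.mpr hall)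
    rcases not_forall.mp hnall with ⟨c, hcgt⟩
    have hc : 2 ≤ l1.count c := by omega
    have hmem : c ∈ l1 := List.count_pos_iff.mp (by omega)
    refine ⟨c, ?_, ?_⟩
    · rw [PySem.Dict.keys_counter]; exact (PySem.Set.mem_ofList _ _).mpr hmem
    · simp only [Function.comp, PySem.Dict.getD_counter, decide_eq_true_eq]
      exact_mod_cast hc

-- B's second guard: set(s) keeps the length ↔ no duplicate.
theorem setLen_eq_iff_nodup (l1 : List Char) :
    (PySem.Set.ofList l1).length = l1.length ↔ l1.Nodup := by
  have hperm : (PySem.Set.ofList l1).Perm l1.dedup := by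
    rw [List.perm_ext_iff_of_nodup (PySem.Set.nodup_ofList l1) l1.nodup_dedup]
    intro x
    rw [PySem.Set.mem_ofList, List.mem_dedup]
  rw [hperm.length_eq]
  constructor
  · intro h
    rw [← List.dedup_eq_self]
    exact (List.dedup_sublist l1).eq_of_length h
  · intro h
    rw [List.dedup_eq_self.mpr h]

-- lookups survive later inserts at other keys
theorem pv_getD_fold_ins_not_mem (l : List (Int × Char)) :
    ∀ (d : PySem.Dict Char Int) (c : Char), (∀ p ∈ l, p.2 ≠ c) →
      (l.foldl (fun d p => d.insert p.2 p.1) d).getD c 0 = d.getD c 0 := by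
  induction l with
  | nil => intro d c _; rfl
  | cons p t ih =>
    intro d c h
    rw [List.foldl_cons, ih _ c (fun q hq => h q (List.mem_cons_of_mem _ hq)),
      PySem.Dict.getD_insert_of_ne _ _ _ (fun he => h p (List.mem_cons_self) he.symm)]

theorem pv_getD_fold_enum (l : List Char) :
    ∀ (s : Int) (d : PySem.Dict Char Int) (c : Char), l.Nodup → c ∈ l →
      ((PySem.List.enumerate l s).foldl (fun d p => d.insert p.2 p.1) d).getD c 0
        = s + (l.idxOf c : Int) := by
  induction l with
  | nil => intro _ _ _ _ h; simp at h
  | cons x t ih =>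
    intro s d c hnd hc
    rw [PySem.List.enumerate_cons, List.foldl_cons]
    by_cases hcx : c = x
    · subst hcx
      have hnotin : c ∉ t := (List.nodup_cons.mp hnd).1
      have hside : ∀ p ∈ PySem.List.enumerate t (s + 1), p.2 ≠ c := by
        intro p hp he
        apply hnotin
        have : p.2 ∈ (PySem.List.enumerate t (s + 1)).map (·.2) := List.mem_map_of_mem hp
        rw [PySem.List.map_snd_enumerate] at this
        rwa [he] at this
      rw [pv_getD_fold_ins_not_mem _ _ _ hside, PySem.Dict.getD_insert_self,
        List.idxOf_cons_self]
      simp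
    · have hct : c ∈ t := by
        rcases List.mem_cons.mp hc with h | h
        · exact absurd h hcx
        · exact h
      rw [ih (s + 1) _ c (List.nodup_cons.mp hnd).2 hct,
        List.idxOf_cons_ne _ (Ne.symm hcx)]
      push_cast
      ring

-- B's position dict on a Nodup list: getD = idxOf.
theorem getD_posDict (l2 : List Char) (hnd : l2.Nodup) (c : Char) (hc : c ∈ l2) :
    ((PySem.List.enumerate l2).foldl (fun d p => d.insert p.2 p.1) PySem.Dict.empty).getD c 0
      = (l2.idxOf c : Int) := by
  rw [pv_getD_fold_enum l2 0 _ c hnd hc]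
  ring

-- Nat-valued twin of invCount, for the arithmetic below.
def invN : List Nat → Nat
  | [] => 0
  | head :: rest => rest.countP (fun q => decide (q < head)) + invN rest

theorem pv_invCount_cons (x : Int) (r : List Int) :
    invCount (x :: r) = (r.countP (fun q => decide (q < x)) : Int) + invCount r := rfl

theorem pv_invN_cons (x : Nat) (r : List Nat) :
    invN (x :: r) = r.countP (fun q => decide (q < x)) + invN r := rfl

theorem invCount_eq_invN (v : List Nat) :
    invCount (v.map (fun n : Nat => (n : Int))) = (invN v : Int) := by
  induction v with
  | nil => simp [invCount, invN]
  | cons h t ih =>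
    rw [List.map_cons, pv_invCount_cons, pv_invN_cons, ih, List.countP_map]
    have hcp : List.countP ((fun q => decide (q < (h : Int))) ∘ fun n : Nat => (n : Int)) t
        = List.countP (fun q => decide (q < h)) t := by
      apply List.countP_congr
      intro x _
      simp only [Function.comp_apply, decide_eq_true_eq]
      exact_mod_cast Iff.rfl
    rw [hcp]
    push_cast
    ring

theorem invN_map_congr (t : List Char) (f g : Char → Nat)
    (h : ∀ x ∈ t, ∀ y ∈ t, (f x < f y ↔ g x < g y)) :
    invN (t.map f) = invN (t.map g) := by
  induction t with
  | nil => rfl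
  | cons a t ih =>
    simp only [List.map_cons, invN, List.countP_map]
    rw [ih (fun x hx y hy => h x (List.mem_cons_of_mem _ hx) y (List.mem_cons_of_mem _ hy))]
    congr 1
    apply List.countP_congr
    intro x hx
    simp only [Function.comp, decide_eq_true_eq]
    exact h x (List.mem_cons_of_mem _ hx) a List.mem_cons_self

theorem pv_map_idxOf_nodup (l : List Char) (hnd : l.Nodup) :
    l.map (fun c => l.idxOf c) = List.range l.length := by
  apply List.ext_getElem
  · simp
  · intro i h1 h2
    simp only [List.getElem_map, List.getElem_range]
    exact hnd.idxOf_getElem i (by simpa using h1)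

theorem pv_countP_range_lt (p n : Nat) :
    (List.range n).countP (fun x => decide (x < p)) = min p n := by
  induction n with
  | zero => simp
  | succ n ih =>
    rw [List.range_succ, List.countP_append, ih]
    simp only [List.countP_cons, List.countP_nil]
    by_cases h : n < p <;> simp [h] <;> omega

theorem pv_idxOf_inj (l : List Char) (_hnd : l.Nodup) (a c : Char) (ha : a ∈ l) (hc : c ∈ l)
    (h : l.idxOf c = l.idxOf a) : c = a := by
  have h1 := List.getElem_idxOf (List.idxOf_lt_length_of_mem ha)
  have h2 := List.getElem_idxOf (List.idxOf_lt_length_of_mem hc)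
  rw [← h1, ← h2]
  simp only [h]

-- removing one element collapses the later indices by one
theorem pv_idxOf_erase (l2 : List Char) :
    ∀ (a c : Char), l2.Nodup → a ∈ l2 → c ∈ l2 → c ≠ a →
      (l2.erase a).idxOf c
        = if l2.idxOf c < l2.idxOf a then l2.idxOf c else l2.idxOf c - 1 := by
  induction l2 with
  | nil => intro a c _ ha; simp at ha
  | cons x t ih =>
    intro a c hnd ha hc hne
    by_cases hxa : x = a
    · subst hxa
      rw [List.erase_cons_head, List.idxOf_cons_self,
        List.idxOf_cons_ne _ (Ne.symm hne)]
      simp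
    · rw [List.erase_cons_tail (by simpa using hxa)]
      have hat : a ∈ t := by
        rcases List.mem_cons.mp ha with h | h
        · exact absurd h.symm hxa
        · exact h
      by_cases hcx : c = x
      · subst hcx
        rw [List.idxOf_cons_self, List.idxOf_cons_self,
          List.idxOf_cons_ne _ hne]
        simp
      · have hct : c ∈ t := by
          rcases List.mem_cons.mp hc with h | h
          · exact absurd h hcx
          · exact h
        rw [List.idxOf_cons_ne _ (Ne.symm hcx),
          List.idxOf_cons_ne _ (Ne.symm hcx),
          List.idxOf_cons_ne _ hxa,
          ih a c (List.nodup_cons.mp hnd).2 hat hct hne]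
        have hdiff : t.idxOf c ≠ t.idxOf a :=
          fun h => hne (pv_idxOf_inj t (List.nodup_cons.mp hnd).2 a c hat hct h)
        split_ifs <;> omega

-- the head's elimination position counts exactly its inversions with the tail
theorem pv_countP_head (a : Char) (t l2 : List Char) (hp : (a :: t).Perm l2) (hnd : l2.Nodup) :
    (t.map (fun c => l2.idxOf c)).countP (fun q => decide (q < l2.idxOf a)) = l2.idxOf a := by
  have ha : a ∈ l2 := hp.subset List.mem_cons_self
  have hperm_t : t.Perm (l2.erase a) := (hp.trans (List.perm_cons_erase ha)).cons_inv
  have hmap : (t.map (fun c => l2.idxOf c)).Perm ((l2.erase a).map (fun c => l2.idxOf c)) :=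
    hperm_t.map _
  rw [hmap.countP_eq]
  have hrr := (List.perm_cons_erase ha).map (fun c => l2.idxOf c)
  rw [List.map_cons, pv_map_idxOf_nodup l2 hnd] at hrr
  have hc2 := hrr.countP_eq (fun q => decide (q < l2.idxOf a))
  rw [pv_countP_range_lt, List.countP_cons] at hc2
  have hd : (decide (l2.idxOf a < l2.idxOf a)) = false := by simp
  simp only [hd, Bool.false_eq_true, if_false] at hc2
  have hlt : l2.idxOf a < l2.length := List.idxOf_lt_length_of_mem ha
  omega

-- inversions are unchanged when positions are taken in the erased list
theorem pv_inv_erase (t l2 : List Char) (a : Char) (hnd : l2.Nodup) (ha : a ∈ l2)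
    (hsub : ∀ c ∈ t, c ∈ l2 ∧ c ≠ a) :
    invN (t.map (fun c => (l2.erase a).idxOf c)) = invN (t.map (fun c => l2.idxOf c)) := by
  apply invN_map_congr
  intro x hx y hy
  obtain ⟨hxl, hxa⟩ := hsub x hx
  obtain ⟨hyl, hya⟩ := hsub y hy
  rw [pv_idxOf_erase l2 a x hnd ha hxl hxa, pv_idxOf_erase l2 a y hnd ha hyl hya]
  have hxd : l2.idxOf x ≠ l2.idxOf a := fun h => hxa (pv_idxOf_inj l2 hnd a x ha hxl h)
  have hyd : l2.idxOf y ≠ l2.idxOf a := fun h => hya (pv_idxOf_inj l2 hnd a y ha hyl h)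
  split_ifs <;> omega

-- the two slices in A's loop body erase the found character
theorem pv_slices_eq_erase (l2 : List Char) (a : Char) :
    PySem.List.slice l2 none (some ((l2.idxOf a : Nat) : Int))
        ++ PySem.List.slice l2 (some ((l2.idxOf a : Int) + 1)) none
      = l2.erase a := by
  rw [PySem.List.slice_to _ (by positivity), PySem.List.slice_from _ (by positivity)]
  have h1 : ((l2.idxOf a : Int)).toNat = l2.idxOf a := by omega
  have h2 : ((l2.idxOf a : Int) + 1).toNat = l2.idxOf a + 1 := by omega
  rw [h1, h2, ← List.eraseIdx_eq_take_drop_succ]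
  exact (List.erase_eq_eraseIdx_of_idxOf rfl).symm

theorem elimLoop_shift (l1 : List Char) :
    ∀ (l2 : List Char) (k : Int),
      elimLoop l1 l2 k = ((elimLoop l1 l2 0).1 + k, (elimLoop l1 l2 0).2) := by
  induction l1 with
  | nil => intro l2 k; simp [elimLoop]
  | cons a t ih =>
    intro l2 k
    match t with
    | [] => simp [elimLoop]
    | [b] => simp [elimLoop]
    | b :: c :: t2 =>
      simp only [elimLoop]
      rw [ih _ (k + PySem.Chars.find l2 [a]), ih _ (0 + PySem.Chars.find l2 [a])]
      refine Prod.ext ?_ rfl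
      simp
      ring

-- the heart: A's elimination count (plus the final 2-char comparison) has the
-- same parity as B's inversion-pair count.
theorem elim_parity (l1 : List Char) : ∀ (l2 : List Char), l1.Perm l2 → l2.Nodup →
    ((elimLoop l1 l2 0).1
        + (if (elimLoop l1 l2 0).2.1 = (elimLoop l1 l2 0).2.2 then (0 : Int) else 1)) % 2
      = (invN (l1.map (fun c => l2.idxOf c)) : Int) % 2 := by
  induction l1 with
  | nil =>
    intro l2 hp _
    have : l2 = [] := hp.symm.eq_nil
    subst this
    simp [elimLoop, invN]
  | cons a t ih =>
    intro l2 hp hnd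
    match t with
    | [] =>
      have : l2 = [a] := List.perm_singleton.mp hp.symm
      subst this
      simp [elimLoop, invN, List.idxOf_cons_self]
    | [b] =>
      have hnd1 : (a :: [b]).Nodup := hp.symm.nodup hnd
      have hab : a ≠ b := by simpa using hnd1
      rcases l2 with _ | ⟨u, w⟩
      · simpa using hp.length_eq
      rcases w with _ | ⟨v, w2⟩
      · simpa using hp.length_eq
      rcases w2 with _ | ⟨z, w3⟩
      swap
      · simpa using hp.length_eq
      have hu : u = a ∨ u = b := by
        have : u ∈ [a, b] := hp.symm.subset List.mem_cons_self
        simpa using this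
      rcases hu with hu | hu
      · have hv : v = b := by
          have hb : b ∈ [u, v] := hp.subset (by simp)
          rcases List.mem_pair.mp hb with h | h
          · rw [hu] at h; exact absurd h.symm hab
          · exact h.symm
        rw [hu, hv]
        have hstep : elimLoop [a, b] [a, b] 0 = (0, [a, b], [a, b]) := rfl
        rw [hstep, if_pos rfl]
        have h1 : List.idxOf a [a, b] = 0 := List.idxOf_cons_self
        have h2 : List.idxOf b [a, b] = 1 := by
          rw [List.idxOf_cons_ne _ hab]
          simp [List.idxOf_cons_self]
        simp only [List.map_cons, List.map_nil, h1, h2]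
        show ((0 : Int) + 0) % 2 = ((invN [0, 1] : Nat) : Int) % 2
        decide
      · have hv : v = a := by
          have hb : a ∈ [u, v] := hp.subset (by simp)
          rcases List.mem_pair.mp hb with h | h
          · rw [hu] at h; exact absurd h hab
          · exact h.symm
        rw [hu, hv]
        have hne' : ([a, b] : List Char) ≠ [b, a] := by simp [hab]
        have hstep : elimLoop [a, b] [b, a] 0 = (0, [a, b], [b, a]) := rfl
        rw [hstep, if_neg hne']
        have h1 : List.idxOf a [b, a] = 1 := by
          rw [List.idxOf_cons_ne _ (Ne.symm hab)]
          simp [List.idxOf_cons_self]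
        have h2 : List.idxOf b [b, a] = 0 := List.idxOf_cons_self
        simp only [List.map_cons, List.map_nil, h1, h2]
        show ((0 : Int) + 1) % 2 = ((invN [1, 0] : Nat) : Int) % 2
        decide
    | b :: c :: t2 =>
      have ha : a ∈ l2 := hp.subset List.mem_cons_self
      have hpos := pv_find_singleton l2 a ha
      have hperm_t : (b :: c :: t2).Perm (l2.erase a) :=
        (hp.trans (List.perm_cons_erase ha)).cons_inv
      have hnd' : (l2.erase a).Nodup := hnd.erase a
      have hstep : elimLoop (a :: b :: c :: t2) l2 0
          = ((elimLoop (b :: c :: t2) (l2.erase a) 0).1 + (l2.idxOf a : Int),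
             (elimLoop (b :: c :: t2) (l2.erase a) 0).2) := by
        show elimLoop (b :: c :: t2) _ (0 + PySem.Chars.find l2 [a]) = _
        rw [hpos, pv_slices_eq_erase l2 a, elimLoop_shift]
        simp
      have hIH := ih (l2.erase a) hperm_t hnd'
      have hnd1 : (a :: b :: c :: t2).Nodup := hp.symm.nodup hnd
      have hsub : ∀ x ∈ (b :: c :: t2), x ∈ l2 ∧ x ≠ a := by
        intro x hx
        refine ⟨hp.subset (List.mem_cons_of_mem _ hx), ?_⟩
        intro he
        subst he
        exact (List.nodup_cons.mp hnd1).1 hx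
      have hrhs : invN ((a :: b :: c :: t2).map (fun x => l2.idxOf x))
          = l2.idxOf a + invN ((b :: c :: t2).map (fun x => (l2.erase a).idxOf x)) := by
        rw [pv_inv_erase _ l2 a hnd ha hsub]
        have hch := pv_countP_head a (b :: c :: t2) l2 hp hnd
        simp only [List.map_cons] at hch ⊢
        simp only [invN]
        omega
      rw [hstep, hrhs]
      push_cast
      omega

-- assembling the Bool result from the parity identity
theorem pv_bool_finish (cnt : Int) (r1 r2 : List Char) (inv : Nat)
    (h : (cnt + (if r1 = r2 then (0 : Int) else 1)) % 2 = (inv : Int) % 2) :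
    ((decide (PySem.Int.mod cnt 2 = 1)) != (r1 == r2))
      = decide (PySem.Int.mod (inv : Int) 2 = 0) := by
  simp only [PySem.Int.mod_eq_emod_of_pos (by norm_num : (0 : Int) < 2)]
  by_cases hr : r1 = r2
  · rw [if_pos hr] at h
    have hbe : (r1 == r2) = true := beq_iff_eq.mpr hr
    by_cases hq : (inv : Int) % 2 = 0
    · have hp2 : ¬ (cnt % 2 = 1) := by omega
      simp [hbe, hq, hp2]
    · have hp2 : cnt % 2 = 1 := by omega
      simp [hbe, hq, hp2]
  · rw [if_neg hr] at h
    have hbe : (r1 == r2) = false := beq_eq_false_iff_ne.mpr hr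
    by_cases hq : (inv : Int) % 2 = 0
    · have hp2 : cnt % 2 = 1 := by omega
      simp [hbe, hq, hp2]
    · have hp2 : ¬ (cnt % 2 = 1) := by omega
      simp [hbe, hq, hp2]

-- ===== VERDICT (by name: the statement is the Claim_ definition above) =====
theorem check_spec : Claim_equal_check := by
  intro string1 string2 _
  unfold Spec_check
  dsimp only [check, check_alt]
  by_cases hperm : string1.toList.Perm string2.toList
  · have hA1 : pvDictEq (PySem.Dict.counter string1.toList)
        (PySem.Dict.counter string2.toList) = true :=
      (pvDictEq_counter_iff _ _).mpr hperm
    have hB1 : PySem.List.sorted string1.toList (fun x => x)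
        = PySem.List.sorted string2.toList (fun x => x) :=
      (PySem.List.sorted_id_eq_sorted_id_iff_perm _ _).mpr hperm
    rw [hA1, hB1]
    simp only [Bool.not_true, Bool.false_eq_true, if_false, bne_self_eq_false]
    by_cases hnd : string1.toList.Nodup
    · have hA2 : ((PySem.Dict.counter string1.toList).values.any (fun v => 1 < v)) = false := by
        rw [← Bool.not_eq_true]
        intro hcontra
        exact (counter_any_gt_one_iff _).mp hcontra hnd
      have hB2 : (PySem.Set.ofList string1.toList).length = string1.toList.length :=
        (setLen_eq_iff_nodup _).mpr hnd
      rw [hA2, hB2]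
      simp only [Bool.false_eq_true, if_false, bne_self_eq_false]
      have hnd2 : string2.toList.Nodup := hperm.nodup hnd
      have hmap : string1.toList.map (fun c =>
          ((PySem.List.enumerate string2.toList).foldl (fun d p => d.insert p.2 p.1)
            PySem.Dict.empty).getD c 0)
          = (string1.toList.map (fun c => string2.toList.idxOf c)).map (fun n : Nat => (n : Int)) := by
        rw [List.map_map]
        apply List.map_congr_left
        intro c hc
        exact getD_posDict string2.toList hnd2 c (hperm.subset hc)
      rw [hmap, invCount_eq_invN]
      exact pv_bool_finish _ _ _ _ (elim_parity string1.toList string2.toList hperm hnd2)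
    · have hA2 : ((PySem.Dict.counter string1.toList).values.any (fun v => 1 < v)) = true :=
        (counter_any_gt_one_iff _).mpr hnd
      have hB2 : (PySem.Set.ofList string1.toList).length ≠ string1.toList.length :=
        fun h => hnd ((setLen_eq_iff_nodup _).mp h)
      have hB2' : ((PySem.Set.ofList string1.toList).length != string1.toList.length) = true :=
        bne_iff_ne.mpr hB2
      rw [hA2, hB2']
      simp
  · have hA1 : pvDictEq (PySem.Dict.counter string1.toList)
        (PySem.Dict.counter string2.toList) = false := by
      rw [← Bool.not_eq_true]
      intro hcontra
      exact hperm ((pvDictEq_counter_iff _ _).mp hcontra)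
    have hB1 : PySem.List.sorted string1.toList (fun x => x)
        ≠ PySem.List.sorted string2.toList (fun x => x) :=
      fun h => hperm ((PySem.List.sorted_id_eq_sorted_id_iff_perm _ _).mp h)
    have hB1' : ((PySem.List.sorted string1.toList (fun x => x))
        != (PySem.List.sorted string2.toList (fun x => x))) = true := bne_iff_ne.mpr hB1
    rw [hA1, hB1']
    simp
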